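-- pv_equiv track=rewrite | github.com/tikhomirovd/Tinkoff_ADS | Python/Contest RK/A. triangle_pascal.py | triangle_pascal
-- ===== SOURCE A (Python) =====
-- def triangle_pascal(n: int, m: int) -> list:
--     arr = [[1 for i in range(m)] for j in range(n)]
--     for i in range(n):
--         for j in range(m):
--             if i == 0 or j == 0:
--                 pass
--             else:
--                 arr[i][j] = arr[i - 1][j] + arr[i][j - 1]
--     return arr
-- ===== SOURCE B (Python) =====
-- import math
--
--
-- def triangle_pascal(n: int, m: int) -> list:
--     return [[math.comb(i + j, i) for j in range(m)] for i in range(n)]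
-- ===== Notes on version B (the rewrite author's own statement) =====
-- stated objective: simpler
-- what changed: Replaces the cumulative above+left dynamic-programming grid updates with a direct closed-form binomial coefficient comb(i+j, i) (the lattice-path count) computed independently per cell.
import Mathlib
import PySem

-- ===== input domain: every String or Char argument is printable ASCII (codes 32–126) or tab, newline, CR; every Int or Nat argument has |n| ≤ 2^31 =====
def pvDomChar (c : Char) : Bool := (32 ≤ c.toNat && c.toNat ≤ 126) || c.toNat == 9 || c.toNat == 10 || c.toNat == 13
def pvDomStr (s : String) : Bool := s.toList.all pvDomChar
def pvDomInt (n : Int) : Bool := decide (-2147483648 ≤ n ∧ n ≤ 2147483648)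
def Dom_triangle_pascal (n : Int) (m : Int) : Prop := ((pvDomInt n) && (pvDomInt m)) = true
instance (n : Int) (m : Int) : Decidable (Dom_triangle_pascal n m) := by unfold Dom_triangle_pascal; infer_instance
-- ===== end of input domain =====

-- B replaces A's above+left DP recurrence by the closed-form binomial comb(i+j, i) per cell (simpler; same asymptotics).

-- ===== PORT A =====
def triangle_pascal (n : Int) (m : Int) : List (List Int) :=
  -- arr = [[1 for i in range(m)] for j in range(n)]
  let arr0 : List (List Int) :=
    (PySem.List.pyRange 0 n 1).map (fun _ => (PySem.List.pyRange 0 m 1).map (fun _ => (1 : Int)))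
  -- for i in range(n): for j in range(m): if i == 0 or j == 0: pass else: arr[i][j] = arr[i-1][j] + arr[i][j-1]
  (PySem.List.pyRange 0 n 1).foldl (fun arr i =>
    (PySem.List.pyRange 0 m 1).foldl (fun arr j =>
      if i = 0 ∨ j = 0 then arr
      else
        PySem.List.pySetD arr i
          (PySem.List.pySetD (PySem.List.pyGetD arr i []) j
            (PySem.List.pyGetD (PySem.List.pyGetD arr (i - 1) []) j 0 +
             PySem.List.pyGetD (PySem.List.pyGetD arr i []) (j - 1) 0))) arr) arr0

-- ===== PORT B =====
def triangle_pascal_alt (n : Int) (m : Int) : List (List Int) :=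
  (PySem.List.pyRange 0 n 1).map (fun i =>
    (PySem.List.pyRange 0 m 1).map (fun j => (Nat.choose (i + j).toNat i.toNat : Int)))

-- ===== PRECONDITION & SPEC =====
def Spec_triangle_pascal (n : Int) (m : Int) (out : List (List Int)) : Prop := out = triangle_pascal_alt n m
instance (n : Int) (m : Int) (out : List (List Int)) : Decidable (Spec_triangle_pascal n m out) := by unfold Spec_triangle_pascal; infer_instance

-- ===== CLAIM (what is proved, stated in full; the proofs are below) =====
def Claim_equal_triangle_pascal : Prop := ∀ (n : Int) (m : Int), Dom_triangle_pascal n m → Spec_triangle_pascal n m (triangle_pascal n m)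

-- ===== LEMMAS AND PROOFS =====

-- row i of Pascal's additive grid, length m
def pvRow (i m : Nat) : List Int := (List.range m).map (fun j => ((i + j).choose i : Int))

-- partially-updated row i: first k cells final, the rest still 1
def pvPart (i m k : Nat) : List Int :=
  (List.range k).map (fun j => ((i + j).choose i : Int)) ++ List.replicate (m - k) 1

theorem pvPart_zero (i m : Nat) : pvPart i m 0 = List.replicate m 1 := by
  simp [pvPart]

theorem pvPart_full (i m : Nat) : pvPart i m m = pvRow i m := by
  simp [pvPart, pvRow]

theorem pvRow_zero (m : Nat) : pvRow 0 m = List.replicate m 1 := by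
  simp [pvRow]

theorem pvPart_one (i m : Nat) (hm : 0 < m) : pvPart i m 1 = pvPart i m 0 := by
  obtain ⟨m', rfl⟩ : ∃ m', m = m' + 1 := ⟨m - 1, by omega⟩
  simp [pvPart, List.replicate_succ]

theorem pyRange_zero_cast (n : Int) :
    PySem.List.pyRange 0 n 1 = (List.range n.toNat).map (fun k : Nat => (k : Int)) := by
  rw [PySem.List.pyRange_one]
  norm_num

theorem getD_append_len {α : Type} (P : List α) (r : α) (rest : List α) (d : α) :
    (P ++ r :: rest).getD P.length d = r := by
  simp [List.getD]

theorem set_append_len {α : Type} (P : List α) (r : α) (rest : List α) (v : α) :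
    (P ++ r :: rest).set P.length v = P ++ v :: rest := by
  rw [List.set_append_right _ _ (Nat.le_refl _)]
  simp

theorem pvRow_getD (i m k : Nat) (hk : k < m) :
    (pvRow i m).getD k 0 = ((i + k).choose i : Int) := by
  simp [pvRow, List.getD, hk]

theorem pvPart_getD_lt (i m k t : Nat) (ht : t < k) :
    (pvPart i m k).getD t 0 = ((i + t).choose i : Int) := by
  simp [pvPart, List.getD, List.getElem?_append_left, ht]

theorem pvPart_set (i m k : Nat) (hk : k < m) :
    (pvPart i m k).set k ((i + k).choose i : Int) = pvPart i m (k + 1) := by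
  have hlen : ((List.range k).map (fun j => ((i + j).choose i : Int))).length = k := by simp
  unfold pvPart
  rw [List.set_append_right _ _ (by omega), hlen]
  obtain ⟨r, hr⟩ : ∃ r, m - k = r + 1 := ⟨m - k - 1, by omega⟩
  rw [hr, List.replicate_succ, List.range_succ, List.map_append]
  have : m - (k + 1) = r := by omega
  simp [this]

-- one inner-loop step on the state P ++ pvPart i m k :: rest finalises cell (i, k)
theorem pv_inner_step (a b m : Nat) (P rest : List (List Int)) (hP : P.length = a + 1)
    (hprev : P.getD a [] = pvRow a m) (hk : b + 1 < m) :
    (fun (arr : List (List Int)) (j : Int) =>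
      if ((a + 1 : Nat) : Int) = 0 ∨ j = 0 then arr
      else
        PySem.List.pySetD arr ((a + 1 : Nat) : Int)
          (PySem.List.pySetD (PySem.List.pyGetD arr ((a + 1 : Nat) : Int) []) j
            (PySem.List.pyGetD (PySem.List.pyGetD arr (((a + 1 : Nat) : Int) - 1) []) j 0 +
             PySem.List.pyGetD (PySem.List.pyGetD arr ((a + 1 : Nat) : Int) []) (j - 1) 0)))
      (P ++ pvPart (a + 1) m (b + 1) :: rest) ((b + 1 : Nat) : Int)
    = P ++ pvPart (a + 1) m (b + 2) :: rest := by
  have hc1 : ((a + 1 : Nat) : Int) ≠ 0 := by push_cast; omega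
  have hc2 : ((b + 1 : Nat) : Int) ≠ 0 := by push_cast; omega
  simp only [if_neg (by push_cast; omega : ¬(((a + 1 : Nat) : Int) = 0 ∨ ((b + 1 : Nat) : Int) = 0))]
  have e1 : (((a + 1 : Nat) : Int) - 1) = ((a : Nat) : Int) := by push_cast; ring
  have e2 : (((b + 1 : Nat) : Int) - 1) = ((b : Nat) : Int) := by push_cast; ring
  rw [e1, e2]
  simp only [PySem.List.pyGetD_natCast, PySem.List.pySetD_natCast]
  have hmid : (P ++ pvPart (a + 1) m (b + 1) :: rest).getD (a + 1) [] = pvPart (a + 1) m (b + 1) := by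
    rw [← hP]; exact getD_append_len _ _ _ _
  have hprev' : (P ++ pvPart (a + 1) m (b + 1) :: rest).getD a [] = pvRow a m := by
    rw [← hprev]
    simp [List.getD, List.getElem?_append_left, (by omega : a < P.length)]
  rw [hmid, hprev', pvRow_getD a m (b + 1) hk, pvPart_getD_lt (a + 1) m (b + 1) b (by omega)]
  have hval : ((a + (b + 1)).choose a : Int) + ((a + 1 + b).choose (a + 1) : Int)
      = ((a + 1 + (b + 1)).choose (a + 1) : Int) := by
    have := Nat.choose_succ_succ (a + b + 1) a
    have e3 : a + (b + 1) = a + b + 1 := by omega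
    have e4 : a + 1 + b = a + b + 1 := by omega
    have e5 : a + 1 + (b + 1) = a + b + 1 + 1 := by omega
    rw [e3, e4, e5, this]
    push_cast; ring
  rw [hval, pvPart_set (a + 1) m (b + 1) hk, ← hP, set_append_len]

theorem foldl_range_cast {α : Type} (f : α → Int → α) (S : Nat → α) (M : Nat)
    (h : ∀ k, k < M → f (S k) (k : Int) = S (k + 1)) :
    ((List.range M).map (fun k : Nat => (k : Int))).foldl f (S 0) = S M := by
  induction M with
  | zero => simp
  | succ M ih =>
    rw [List.range_succ, List.map_append, List.foldl_append,
      ih (fun k hk => h k (by omega))]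
    simpa using h M (by omega)

theorem foldl_skip {α β : Type} (l : List β) (arr : α) (f : α → β → α)
    (h : ∀ a b, f a b = a) : l.foldl f arr = arr := by
  induction l generalizing arr with
  | nil => rfl
  | cons x xs ih => rw [List.foldl_cons, h, ih]

theorem pv_inner_fold (a m : Nat) (P rest : List (List Int)) (hP : P.length = a + 1)
    (hprev : P.getD a [] = pvRow a m) :
    ((List.range m).map (fun k : Nat => (k : Int))).foldl
      (fun (arr : List (List Int)) (j : Int) =>
        if ((a + 1 : Nat) : Int) = 0 ∨ j = 0 then arr
        else
          PySem.List.pySetD arr ((a + 1 : Nat) : Int)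
            (PySem.List.pySetD (PySem.List.pyGetD arr ((a + 1 : Nat) : Int) []) j
              (PySem.List.pyGetD (PySem.List.pyGetD arr (((a + 1 : Nat) : Int) - 1) []) j 0 +
               PySem.List.pyGetD (PySem.List.pyGetD arr ((a + 1 : Nat) : Int) []) (j - 1) 0)))
      (P ++ List.replicate m 1 :: rest)
    = P ++ pvRow (a + 1) m :: rest := by
  rw [show P ++ List.replicate m 1 :: rest = P ++ pvPart (a + 1) m 0 :: rest by rw [pvPart_zero],
    ← pvPart_full]
  refine foldl_range_cast _ (fun k => P ++ pvPart (a + 1) m k :: rest) m ?_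
  intro k hk
  match k with
  | 0 => simp [pvPart_one (a + 1) m hk]
  | b + 1 => exact pv_inner_step a b m P rest hP hprev hk

theorem map_const_replicate {α β : Type} (l : List α) (c : β) :
    l.map (fun _ => c) = List.replicate l.length c := by
  induction l with
  | nil => rfl
  | cons x xs ih => simp [List.replicate_succ, ih]

theorem triangle_pascal_spec : Claim_equal_triangle_pascal := by
  intro n m _
  unfold Spec_triangle_pascal triangle_pascal triangle_pascal_alt
  rw [pyRange_zero_cast n, pyRange_zero_cast m]
  have hB : ((List.range n.toNat).map (fun k : Nat => (k : Int))).map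
      (fun i => ((List.range m.toNat).map (fun k : Nat => (k : Int))).map
        (fun j => ((i + j).toNat.choose i.toNat : Int)))
      = (List.range n.toNat).map (fun a => pvRow a m.toNat) := by
    rw [List.map_map]
    refine List.map_congr_left ?_
    intro a _
    simp only [Function.comp, List.map_map, pvRow]
    refine List.map_congr_left ?_
    intro j _
    have h1 : ((a : Int) + (j : Int)).toNat = a + j := by omega
    simp only [Function.comp, h1, Int.toNat_natCast]
  rw [hB]
  have hA0 : ((List.range n.toNat).map (fun k : Nat => (k : Int))).map
      (fun _ => ((List.range m.toNat).map (fun k : Nat => (k : Int))).map (fun _ => (1 : Int)))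
      = List.replicate n.toNat (List.replicate m.toNat 1) := by
    rw [map_const_replicate, map_const_replicate]; simp
  rw [hA0]
  have hT0 : List.replicate n.toNat (List.replicate m.toNat 1)
      = (List.range 0).map (fun a => pvRow a m.toNat) ++
        List.replicate (n.toNat - 0) (List.replicate m.toNat (1 : Int)) := by simp
  rw [hT0]
  have := foldl_range_cast
    (fun (arr : List (List Int)) (i : Int) =>
      ((List.range m.toNat).map (fun k : Nat => (k : Int))).foldl
        (fun (arr : List (List Int)) (j : Int) =>
          if i = 0 ∨ j = 0 then arr
          else
            PySem.List.pySetD arr i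
              (PySem.List.pySetD (PySem.List.pyGetD arr i []) j
                (PySem.List.pyGetD (PySem.List.pyGetD arr (i - 1) []) j 0 +
                 PySem.List.pyGetD (PySem.List.pyGetD arr i []) (j - 1) 0))) arr)
    (fun i => (List.range i).map (fun a => pvRow a m.toNat) ++
      List.replicate (n.toNat - i) (List.replicate m.toNat 1)) n.toNat ?_
  · simpa using this
  · intro i hi
    beta_reduce
    match i with
    | 0 =>
      rw [foldl_skip _ _ _ (by intro a b; simp)]
      obtain ⟨N', hN⟩ : ∃ N', n.toNat = N' + 1 := ⟨n.toNat - 1, by omega⟩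
      simp [hN, List.replicate_succ, pvRow_zero]
    | a + 1 =>
      have hrest : List.replicate (n.toNat - (a + 1)) (List.replicate m.toNat (1 : Int))
          = List.replicate m.toNat (1 : Int) ::
            List.replicate (n.toNat - (a + 2)) (List.replicate m.toNat (1 : Int)) := by
        rw [show n.toNat - (a + 1) = (n.toNat - (a + 2)) + 1 by omega, List.replicate_succ]
      rw [hrest]
      rw [pv_inner_fold a m.toNat ((List.range (a + 1)).map (fun x => pvRow x m.toNat))
        (List.replicate (n.toNat - (a + 2)) (List.replicate m.toNat (1 : Int)))
        (by simp)
        (by simp [List.getD])]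
      rw [List.range_succ (n := a + 1), List.map_append]
      simp
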